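-- pv_equiv track=rewrite | github.com/aria1th/Torus-Hamilton-Decomposition | scripts/torus_nd_d5_slice4_transport_search_115.py | transport_stats_subset
-- ===== SOURCE A (Python) =====
-- import itertools
-- from collections import defaultdict
--
-- def pred_b23zm(x: tuple[int, int, int, int, int], m: int):
--     z = tuple(i for i, v in enumerate(x) if v == 0)
--     mset = tuple(i for i, v in enumerate(x) if v == m - 1)
--     b2 = tuple(i for i in range(5) if (x[(i - 1) % 5] + x[(i + 2) % 5]) % m == 2)
--     b3 = tuple(i for i in range(5) if (x[(i - 1) % 5] + x[(i + 2) % 5]) % m == 3)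
--     return (b2, b3, z, mset)
--
-- def subset_field(x: tuple[int, int, int, int, int], m: int, subset: tuple[int, ...]):
--     z = tuple(i for i, v in enumerate(x) if v == 0)
--     mset = tuple(i for i, v in enumerate(x) if v == m - 1)
--     blocks = tuple(
--         tuple(i for i in range(5) if (x[(i - 1) % 5] + x[(i + 2) % 5]) % m == k)
--         for k in subset
--     )
--     return blocks + (z, mset)
--
-- def transport_stats_subset(m: int, subset: tuple[int, ...]) -> dict[str, int]:
--     predmap: defaultdict[tuple[object, int], set[object]] = defaultdict(set)
--     states = set()
--     for y in itertools.product(range(m), repeat=5):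
--         if sum(y) % m != 4:
--             continue
--         fy = subset_field(y, m, subset)
--         states.add(fy)
--         for j in range(5):
--             x = list(y)
--             x[j] = (x[j] - 1) % m
--             predmap[(fy, j)].add(pred_b23zm(tuple(x), m))
--     nondet = sum(1 for v in predmap.values() if len(v) > 1)
--     max_mult = max((len(v) for v in predmap.values()), default=0)
--     return {"state_count": len(states), "nondet_pairs": nondet, "max_multiplicity": max_mult}
-- ===== SOURCE B (Python) =====
-- # B: enumerate only the sum % m == 4 states with four nested coordinate loops,
-- # deriving the fifth coordinate (attainable only when m > 4) instead of
-- # scanning all m^5 tuples and filtering; one shared field helper with unrolled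
-- # cyclic pair sums replaces A's two near-identical helpers, predecessors are
-- # built by tuple slicing, and one final pass yields all three summary numbers.
--
--
-- def _field(x, m, ks):
--     x0, x1, x2, x3, x4 = x
--     s = ((x4 + x2) % m, (x0 + x3) % m, (x1 + x4) % m, (x2 + x0) % m, (x3 + x1) % m)
--     r5 = (0, 1, 2, 3, 4)
--     out = [tuple(i for i in r5 if s[i] == k) for k in ks]
--     out.append(tuple(i for i in r5 if x[i] == 0))
--     out.append(tuple(i for i in r5 if x[i] == m - 1))
--     return tuple(out)
--
-- def transport_stats_subset(m, subset):
--     seen = set()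
--     groups = {}
--     if m > 4:
--         rng = range(m)
--         for a in rng:
--             for b in rng:
--                 for c in rng:
--                     for d in rng:
--                         y = (a, b, c, d, (4 - a - b - c - d) % m)
--                         fy = _field(y, m, subset)
--                         seen.add(fy)
--                         for j in range(5):
--                             x = y[:j] + ((y[j] - 1) % m,) + y[j + 1:]
--                             g = groups.get((fy, j), set())
--                             g.add(_field(x, m, (2, 3)))
--                             groups[(fy, j)] = g
--     nondet = 0
--     mx = 0
--     for g in groups.values():
--         n = len(g)
--         if n > 1:
--             nondet += 1
--         if n > mx:
--             mx = n
--     return {"state_count": len(seen), "nondet_pairs": nondet, "max_multiplicity": mx}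
-- ===== Notes on version B (the rewrite author's own statement) =====
-- stated objective: faster
-- what changed: B replaces A's filtered scan of all m^5 tuples by four nested loops that derive the fifth coordinate as (4 - a - b - c - d) % m (attainable only when m > 4), merges A's two near-identical field helpers into one with unrolled cyclic pair sums, builds predecessors by tuple slicing instead of list mutation, and computes the three summary numbers in a single final pass.
import Mathlib
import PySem

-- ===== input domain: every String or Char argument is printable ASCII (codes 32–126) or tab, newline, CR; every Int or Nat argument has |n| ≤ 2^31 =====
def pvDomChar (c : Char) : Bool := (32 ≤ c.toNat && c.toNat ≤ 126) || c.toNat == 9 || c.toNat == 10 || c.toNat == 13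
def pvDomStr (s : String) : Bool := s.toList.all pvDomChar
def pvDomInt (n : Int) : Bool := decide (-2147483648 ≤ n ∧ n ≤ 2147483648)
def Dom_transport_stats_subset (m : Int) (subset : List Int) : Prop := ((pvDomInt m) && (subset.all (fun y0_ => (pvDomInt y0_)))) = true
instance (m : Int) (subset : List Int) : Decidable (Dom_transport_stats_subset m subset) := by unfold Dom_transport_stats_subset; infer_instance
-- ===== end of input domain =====

-- B enumerates only the sum ≡ 4 (mod m) states with four nested coordinate loops
-- (the fifth coordinate is derived instead of filtered for), with one shared
-- unrolled field helper and a single aggregation pass for the three numbers;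
-- equal return value proved on the whole domain (no side effects involved).

-- ===== PORT A =====
-- Python tuples of ints / tuples of tuples are encoded as List Int / List (List Int)
-- (fixed arity per use site, so list equality is exactly Python tuple equality).
-- All indices x[(i-1)%5], x[(i+2)%5], x[j] lie in [0,5) on the length-5 tuples they
-- are applied to, so the pyGetD/pySetD defaults are never used (exact port).

-- tuple(i for i, v in enumerate(x) if v == 0)
def pvZeroIdx (x : List Int) : List Int :=
  ((PySem.List.enumerate x).filter (fun p => p.2 == 0)).map (fun p => p.1)

-- tuple(i for i, v in enumerate(x) if v == m - 1)
def pvMaxIdx (x : List Int) (m : Int) : List Int :=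
  ((PySem.List.enumerate x).filter (fun p => p.2 == m - 1)).map (fun p => p.1)

-- tuple(i for i in range(5) if (x[(i-1)%5] + x[(i+2)%5]) % m == k)
def pvBlk (x : List Int) (m k : Int) : List Int :=
  (PySem.List.pyRange 0 5 1).filter (fun i =>
    PySem.Int.mod (PySem.List.pyGetD x (PySem.Int.mod (i - 1) 5) 0 +
                   PySem.List.pyGetD x (PySem.Int.mod (i + 2) 5) 0) m == k)

def pred_b23zm (x : List Int) (m : Int) : List (List Int) :=
  [pvBlk x m 2, pvBlk x m 3, pvZeroIdx x, pvMaxIdx x m]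

def subset_field (x : List Int) (m : Int) (subset : List Int) : List (List Int) :=
  (subset.map (fun k => pvBlk x m k)) ++ [pvZeroIdx x, pvMaxIdx x m]

abbrev PvStateA :=
  PySem.Set (List (List Int)) ×
  PySem.Dict ((List (List Int)) × Int) (PySem.Set (List (List Int)))

-- the body of A's loop for one admitted y (states.add, the j-loop on predmap)
def pvStepA (m : Int) (subset : List Int) (st : PvStateA) (y : List Int) : PvStateA :=
  let fy := subset_field y m subset
  let states := PySem.Set.add st.1 fy
  let pm := (PySem.List.pyRange 0 5 1).foldl (fun pm j =>
      let x := PySem.List.pySetD y j (PySem.Int.mod (PySem.List.pyGetD y j 0 - 1) m)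
      PySem.Dict.modify pm (fy, j) PySem.Set.empty
        (fun s => PySem.Set.add s (pred_b23zm x m))) st.2
  (states, pm)

-- itertools.product(range(m), repeat=5), lexicographic
def pvProd5 (m : Int) : List (List Int) :=
  (PySem.List.pyRange 0 m 1).flatMap fun a =>
  (PySem.List.pyRange 0 m 1).flatMap fun b =>
  (PySem.List.pyRange 0 m 1).flatMap fun c =>
  (PySem.List.pyRange 0 m 1).flatMap fun d =>
  (PySem.List.pyRange 0 m 1).map fun e => [a, b, c, d, e]

-- the three summary numbers and the result dict
def pvFinishA (st : PvStateA) : List (String × Int) :=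
  let vals := PySem.Dict.values st.2
  let nondet := vals.foldl (fun n v => if 1 < PySem.Set.len v then n + 1 else n) (0 : Int)
  let maxMult := PySem.List.maxD (vals.map (fun v => PySem.Set.len v)) (fun x => x) 0
  [("state_count", PySem.Set.len st.1), ("nondet_pairs", nondet),
   ("max_multiplicity", maxMult)]

def transport_stats_subset (m : Int) (subset : List Int) : List (String × Int) :=
  pvFinishA ((pvProd5 m).foldl
    (fun st y => if PySem.Int.mod y.sum m == 4 then pvStepA m subset st y else st)
    (PySem.Set.empty, PySem.Dict.empty))

-- ===== PORT B =====
-- _field(x, m, ks): the five cyclic pair sums are unrolled after unpacking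
-- x0, .., x4 = x (Python raises on the unpack unless len(x) == 5, which every
-- call site guarantees, so the catch-all branch below is unreachable)
def pvFieldAlt (x : List Int) (m : Int) (ks : List Int) : List (List Int) :=
  match x with
  | [x0, x1, x2, x3, x4] =>
    let s : List Int := [PySem.Int.mod (x4 + x2) m, PySem.Int.mod (x0 + x3) m,
                         PySem.Int.mod (x1 + x4) m, PySem.Int.mod (x2 + x0) m,
                         PySem.Int.mod (x3 + x1) m]
    let r5 : List Int := [0, 1, 2, 3, 4]
    (ks.map fun k => r5.filter fun i => PySem.List.pyGetD s i 0 == k)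
      ++ [r5.filter fun i => PySem.List.pyGetD x i 0 == 0,
          r5.filter fun i => PySem.List.pyGetD x i 0 == m - 1]
  | _ => []

-- loop body for one (a, b, c, d): y, fy, seen.add, and the j-loop
def pvVisit (m : Int) (ks : List Int)
    (acc : PvStateA) (a b c d : Int) : PvStateA :=
  let y : List Int := [a, b, c, d, PySem.Int.mod (4 - a - b - c - d) m]
  let fy := pvFieldAlt y m ks
  let seen := PySem.Set.add acc.1 fy
  let groups := (PySem.List.pyRange 0 5 1).foldl (fun gs j =>
      let x := PySem.List.slice y none (some j)
               ++ [PySem.Int.mod (PySem.List.pyGetD y j 0 - 1) m]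
               ++ PySem.List.slice y (some (j + 1)) none
      let g := PySem.Dict.getD gs (fy, j) PySem.Set.empty
      PySem.Dict.insert gs (fy, j) (PySem.Set.add g (pvFieldAlt x m [2, 3]))) acc.2
  (seen, groups)

def pvMainLoop (m : Int) (ks : List Int) : PvStateA :=
  if 4 < m then
    (PySem.List.pyRange 0 m 1).foldl (fun acc a =>
    (PySem.List.pyRange 0 m 1).foldl (fun acc b =>
    (PySem.List.pyRange 0 m 1).foldl (fun acc c =>
    (PySem.List.pyRange 0 m 1).foldl (fun acc d =>
      pvVisit m ks acc a b c d) acc) acc) acc)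
      (PySem.Set.empty, PySem.Dict.empty)
  else (PySem.Set.empty, PySem.Dict.empty)

-- final pass: nondet and mx in one loop over the group values
def pvStats (acc : PvStateA) : List (String × Int) :=
  let stats := (PySem.Dict.values acc.2).foldl
    (fun (p : Int × Int) g =>
      let n := PySem.Set.len g
      (if 1 < n then p.1 + 1 else p.1, if p.2 < n then n else p.2)) ((0 : Int), (0 : Int))
  [("state_count", PySem.Set.len acc.1), ("nondet_pairs", stats.1),
   ("max_multiplicity", stats.2)]

def transport_stats_subset_alt (m : Int) (subset : List Int) : List (String × Int) :=
  pvStats (pvMainLoop m subset)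

-- ===== PRECONDITION & SPEC =====
def Spec_transport_stats_subset (m : Int) (subset : List Int) (out : List (String × Int)) : Prop := out = transport_stats_subset_alt m subset
instance (m : Int) (subset : List Int) (out : List (String × Int)) : Decidable (Spec_transport_stats_subset m subset out) := by unfold Spec_transport_stats_subset; infer_instance

-- ===== CLAIM (what is proved, stated in full; the proofs are below) =====
def Claim_equal_transport_stats_subset : Prop := ∀ (m : Int) (subset : List Int), Dom_transport_stats_subset m subset → Spec_transport_stats_subset m subset (transport_stats_subset m subset)

-- ===== LEMMAS AND PROOFS =====

theorem pv_range5 : PySem.List.pyRange 0 5 1 = [0, 1, 2, 3, 4] := rfl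

-- A's indices-where helpers as filters over range(len x)
theorem pv_idx (x : List Int) (c : Int → Bool) :
    ((PySem.List.enumerate x).filter (fun p => c p.2)).map (fun p => p.1)
      = (PySem.List.pyRange 0 (x.length : Int) 1).filter
          (fun i => c (PySem.List.pyGetD x i 0)) := by
  rw [PySem.List.enumerate_eq_map_pyRange (d := 0), List.filter_map, List.map_map]
  simp [Function.comp_def]

theorem pv_zero_eq (x : List Int) :
    pvZeroIdx x = (PySem.List.pyRange 0 (x.length : Int) 1).filter
      (fun i => PySem.List.pyGetD x i 0 == 0) :=
  pv_idx x (fun v => v == 0)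

theorem pv_max_eq (x : List Int) (m : Int) :
    pvMaxIdx x m = (PySem.List.pyRange 0 (x.length : Int) 1).filter
      (fun i => PySem.List.pyGetD x i 0 == m - 1) :=
  pv_idx x (fun v => v == m - 1)

-- one block of B's field is A's pvBlk (both filter the same five indices)
theorem pv_blk_eq (m k v0 v1 v2 v3 v4 : Int) :
    List.filter (fun i =>
        PySem.List.pyGetD [PySem.Int.mod (v4 + v2) m, PySem.Int.mod (v0 + v3) m,
          PySem.Int.mod (v1 + v4) m, PySem.Int.mod (v2 + v0) m,
          PySem.Int.mod (v3 + v1) m] i 0 == k) [0, 1, 2, 3, 4]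
      = pvBlk [v0, v1, v2, v3, v4] m k := by
  unfold pvBlk
  rw [pv_range5]
  refine List.filter_congr ?_
  intro i hi
  fin_cases hi <;> rfl

-- on length-5 tuples B's field helper is A's subset_field
theorem pv_field_eq (m : Int) (ks : List Int) (v0 v1 v2 v3 v4 : Int) :
    pvFieldAlt [v0, v1, v2, v3, v4] m ks = subset_field [v0, v1, v2, v3, v4] m ks := by
  rw [show pvFieldAlt [v0, v1, v2, v3, v4] m ks
      = (ks.map fun k => List.filter (fun i =>
          PySem.List.pyGetD [PySem.Int.mod (v4 + v2) m, PySem.Int.mod (v0 + v3) m,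
            PySem.Int.mod (v1 + v4) m, PySem.Int.mod (v2 + v0) m,
            PySem.Int.mod (v3 + v1) m] i 0 == k) [0, 1, 2, 3, 4])
        ++ [List.filter (fun i => PySem.List.pyGetD [v0, v1, v2, v3, v4] i 0 == 0) [0, 1, 2, 3, 4],
            List.filter (fun i => PySem.List.pyGetD [v0, v1, v2, v3, v4] i 0 == m - 1) [0, 1, 2, 3, 4]]
      from rfl]
  unfold subset_field
  rw [pv_zero_eq, pv_max_eq]
  refine congrArg₂ (· ++ ·)
    (List.map_congr_left (fun k _ => pv_blk_eq m k v0 v1 v2 v3 v4)) ?_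
  simp [pv_range5]

-- pred_b23zm is subset_field at (2, 3), hence B's field at [2, 3]
theorem pv_pred_eq (m : Int) (v0 v1 v2 v3 v4 : Int) :
    pred_b23zm [v0, v1, v2, v3, v4] m = pvFieldAlt [v0, v1, v2, v3, v4] m [2, 3] := by
  have h : pred_b23zm [v0, v1, v2, v3, v4] m = subset_field [v0, v1, v2, v3, v4] m [2, 3] := rfl
  rw [h, pv_field_eq]

-- Python's d[k] = f(d.get(k, dflt)) written with get-then-assign
theorem pv_modify_insert {κ ν : Type} [BEq κ] (d : PySem.Dict κ ν) (k : κ) (d0 : ν)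
    (f : ν → ν) : PySem.Dict.modify d k d0 f = PySem.Dict.insert d k (f (PySem.Dict.getD d k d0)) := rfl

-- the admitted states, as a list (proof-side)
def pvYs (m : Int) : List (List Int) :=
  (PySem.List.pyRange 0 m 1).flatMap fun a =>
  (PySem.List.pyRange 0 m 1).flatMap fun b =>
  (PySem.List.pyRange 0 m 1).flatMap fun c =>
  (PySem.List.pyRange 0 m 1).map fun d =>
    [a, b, c, d, PySem.Int.mod (4 - a - b - c - d) m]

-- literal shapes of the five predecessor tuples, on both sides
theorem pv_xB0 (m a b c d e : Int) :
    PySem.List.slice [a, b, c, d, e] none (some 0)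
      ++ [PySem.Int.mod (PySem.List.pyGetD [a, b, c, d, e] 0 0 - 1) m]
      ++ PySem.List.slice [a, b, c, d, e] (some (0 + 1)) none
      = [PySem.Int.mod (a - 1) m, b, c, d, e] := rfl
theorem pv_xB1 (m a b c d e : Int) :
    PySem.List.slice [a, b, c, d, e] none (some 1)
      ++ [PySem.Int.mod (PySem.List.pyGetD [a, b, c, d, e] 1 0 - 1) m]
      ++ PySem.List.slice [a, b, c, d, e] (some (1 + 1)) none
      = [a, PySem.Int.mod (b - 1) m, c, d, e] := rfl
theorem pv_xB2 (m a b c d e : Int) :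
    PySem.List.slice [a, b, c, d, e] none (some 2)
      ++ [PySem.Int.mod (PySem.List.pyGetD [a, b, c, d, e] 2 0 - 1) m]
      ++ PySem.List.slice [a, b, c, d, e] (some (2 + 1)) none
      = [a, b, PySem.Int.mod (c - 1) m, d, e] := rfl
theorem pv_xB3 (m a b c d e : Int) :
    PySem.List.slice [a, b, c, d, e] none (some 3)
      ++ [PySem.Int.mod (PySem.List.pyGetD [a, b, c, d, e] 3 0 - 1) m]
      ++ PySem.List.slice [a, b, c, d, e] (some (3 + 1)) none
      = [a, b, c, PySem.Int.mod (d - 1) m, e] := rfl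
theorem pv_xB4 (m a b c d e : Int) :
    PySem.List.slice [a, b, c, d, e] none (some 4)
      ++ [PySem.Int.mod (PySem.List.pyGetD [a, b, c, d, e] 4 0 - 1) m]
      ++ PySem.List.slice [a, b, c, d, e] (some (4 + 1)) none
      = [a, b, c, d, PySem.Int.mod (e - 1) m] := rfl
theorem pv_xA0 (m a b c d e : Int) :
    PySem.List.pySetD [a, b, c, d, e] 0 (PySem.Int.mod (PySem.List.pyGetD [a, b, c, d, e] 0 0 - 1) m)
      = [PySem.Int.mod (a - 1) m, b, c, d, e] := rfl
theorem pv_xA1 (m a b c d e : Int) :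
    PySem.List.pySetD [a, b, c, d, e] 1 (PySem.Int.mod (PySem.List.pyGetD [a, b, c, d, e] 1 0 - 1) m)
      = [a, PySem.Int.mod (b - 1) m, c, d, e] := rfl
theorem pv_xA2 (m a b c d e : Int) :
    PySem.List.pySetD [a, b, c, d, e] 2 (PySem.Int.mod (PySem.List.pyGetD [a, b, c, d, e] 2 0 - 1) m)
      = [a, b, PySem.Int.mod (c - 1) m, d, e] := rfl
theorem pv_xA3 (m a b c d e : Int) :
    PySem.List.pySetD [a, b, c, d, e] 3 (PySem.Int.mod (PySem.List.pyGetD [a, b, c, d, e] 3 0 - 1) m)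
      = [a, b, c, PySem.Int.mod (d - 1) m, e] := rfl
theorem pv_xA4 (m a b c d e : Int) :
    PySem.List.pySetD [a, b, c, d, e] 4 (PySem.Int.mod (PySem.List.pyGetD [a, b, c, d, e] 4 0 - 1) m)
      = [a, b, c, d, PySem.Int.mod (e - 1) m] := rfl

-- B's visit body is A's step at the derived tuple
theorem pv_visit_eq (m : Int) (ks : List Int) (a b c d : Int) (acc : PvStateA) :
    pvVisit m ks acc a b c d
      = pvStepA m ks acc [a, b, c, d, PySem.Int.mod (4 - a - b - c - d) m] := by
  unfold pvVisit pvStepA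
  simp only [pv_field_eq, pv_range5, List.foldl_cons, List.foldl_nil, pv_modify_insert,
    pv_xB0, pv_xB1, pv_xB2, pv_xB3, pv_xB4, pv_xA0, pv_xA1, pv_xA2, pv_xA3, pv_xA4,
    pv_pred_eq]

-- exactly one e in range(m) completes a given prefix sum to residue 4, and only if 4 < m
theorem pv_filter_single (m s : Int) (h4 : 4 < m) :
    (PySem.List.pyRange 0 m 1).filter (fun e => PySem.Int.mod (s + e) m == 4)
      = [PySem.Int.mod (4 - s) m] := by
  have hm : (0:Int) < m := by omega
  have h4m : (4:Int) % m = 4 := Int.emod_eq_of_lt (by norm_num) h4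
  have h0 : 0 ≤ PySem.Int.mod (4 - s) m := PySem.Int.mod_nonneg _ hm
  have h1 : PySem.Int.mod (4 - s) m < m := PySem.Int.mod_lt _ hm
  have hmem : PySem.Int.mod (4 - s) m ∈ PySem.List.pyRange 0 m 1 :=
    PySem.List.mem_pyRange_one.mpr ⟨h0, h1⟩
  have hcongr : ∀ e ∈ PySem.List.pyRange 0 m 1,
      (PySem.Int.mod (s + e) m == 4) = (e == PySem.Int.mod (4 - s) m) := by
    intro e he
    obtain ⟨he0, he1⟩ := PySem.List.mem_pyRange_one.mp he
    rw [Bool.eq_iff_iff, beq_iff_eq, beq_iff_eq,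
        PySem.Int.mod_eq_emod_of_pos hm, PySem.Int.mod_eq_emod_of_pos hm]
    constructor
    · intro h
      calc e = e % m := (Int.emod_eq_of_lt he0 he1).symm
        _ = ((s + e) - s) % m := by ring_nf
        _ = ((s + e) % m - s % m) % m := by rw [← Int.sub_emod]
        _ = (4 - s % m) % m := by rw [h]
        _ = (4 % m - s % m) % m := by rw [h4m]
        _ = (4 - s) % m := (Int.sub_emod _ _ _).symm
    · intro h
      subst h
      calc (s + (4 - s) % m) % m
          = (s % m + (4 - s) % m % m) % m := Int.add_emod _ _ _
        _ = (s % m + (4 - s) % m) % m := by rw [Int.emod_emod_of_dvd _ (dvd_refl m)]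
        _ = (s + (4 - s)) % m := (Int.add_emod _ _ _).symm
        _ = 4 % m := by ring_nf
        _ = 4 := h4m
  rw [List.filter_congr hcongr, List.filter_beq,
      List.count_eq_one_of_mem (PySem.List.nodup_pyRange_one 0 m) hmem, List.replicate_one]

theorem pv_filter_none (m s : Int) (h4 : ¬ 4 < m) :
    (PySem.List.pyRange 0 m 1).filter (fun e => PySem.Int.mod (s + e) m == 4) = [] := by
  rw [List.filter_eq_nil_iff]
  intro e he
  obtain ⟨he0, he1⟩ := PySem.List.mem_pyRange_one.mp he
  have hm : (0:Int) < m := by omega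
  have := PySem.Int.mod_lt (s + e) hm
  simp only [beq_iff_eq]
  omega

-- one cell of the enumeration: the admitted completions of a fixed 4-prefix
theorem pv_cell (m : Int) (h4 : 4 < m) (a b c d : Int) :
    ((PySem.List.pyRange 0 m 1).map (fun e => [a, b, c, d, e])).filter
        (fun y => PySem.Int.mod y.sum m == 4)
      = [[a, b, c, d, PySem.Int.mod (4 - a - b - c - d) m]] := by
  rw [List.filter_map]
  have hpred : ((fun y => PySem.Int.mod y.sum m == 4) ∘ fun e => [a, b, c, d, e])
      = fun e => PySem.Int.mod ((a + b + c + d) + e) m == 4 := by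
    funext e
    simp only [Function.comp, List.sum_cons, List.sum_nil]
    congr 1
    ring_nf
  rw [hpred, pv_filter_single m (a + b + c + d) h4]
  have he : 4 - (a + b + c + d) = 4 - a - b - c - d := by ring
  rw [he]
  rfl

theorem pv_cell_none (m : Int) (h4 : ¬ 4 < m) (a b c d : Int) :
    ((PySem.List.pyRange 0 m 1).map (fun e => [a, b, c, d, e])).filter
        (fun y => PySem.Int.mod y.sum m == 4) = [] := by
  rw [List.filter_map]
  have hpred : ((fun y => PySem.Int.mod y.sum m == 4) ∘ fun e => [a, b, c, d, e])
      = fun e => PySem.Int.mod ((a + b + c + d) + e) m == 4 := by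
    funext e
    simp only [Function.comp, List.sum_cons, List.sum_nil]
    congr 1
    ring_nf
  rw [hpred, pv_filter_none m (a + b + c + d) h4]
  rfl

theorem pv_row (m : Int) (h4 : 4 < m) (a b c : Int) (l : List Int) :
    (l.flatMap fun d => ((PySem.List.pyRange 0 m 1).map (fun e => [a, b, c, d, e])).filter
        (fun y => PySem.Int.mod y.sum m == 4))
      = l.map (fun d => [a, b, c, d, PySem.Int.mod (4 - a - b - c - d) m]) := by
  induction l with
  | nil => rfl
  | cons d l ih =>
    rw [List.flatMap_cons, pv_cell m h4, ih]
    rfl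

-- the filtered 5-fold enumeration IS the derived 4-fold enumeration
theorem pv_key (m : Int) :
    (pvProd5 m).filter (fun y => PySem.Int.mod y.sum m == 4)
      = if 4 < m then pvYs m else [] := by
  unfold pvProd5 pvYs
  by_cases h4 : 4 < m
  · simp only [if_pos h4, List.filter_flatMap]
    congr 1
    funext a
    congr 1
    funext b
    congr 1
    funext c
    exact pv_row m h4 a b c _
  · simp only [if_neg h4, List.filter_flatMap]
    simp [pv_cell_none m h4]

-- B's nested main loop is A's step folded over the derived enumeration
theorem pv_main_eq (m : Int) (ks : List Int) :
    (PySem.List.pyRange 0 m 1).foldl (fun acc a =>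
    (PySem.List.pyRange 0 m 1).foldl (fun acc b =>
    (PySem.List.pyRange 0 m 1).foldl (fun acc c =>
    (PySem.List.pyRange 0 m 1).foldl (fun acc d =>
      pvVisit m ks acc a b c d) acc) acc) acc)
      ((PySem.Set.empty, PySem.Dict.empty) : PvStateA)
    = (pvYs m).foldl (pvStepA m ks) (PySem.Set.empty, PySem.Dict.empty) := by
  rw [pvYs]
  simp only [List.foldl_flatMap, List.foldl_map, pv_visit_eq]

-- the two aggregations agree
theorem pv_pair_fold (l : List (PySem.Set (List (List Int)))) :
    ∀ (n x : Int),
      l.foldl (fun (p : Int × Int) g =>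
          let k := PySem.Set.len g
          (if 1 < k then p.1 + 1 else p.1, if p.2 < k then k else p.2)) (n, x)
        = (l.foldl (fun q g => if 1 < PySem.Set.len g then q + 1 else q) n,
           l.foldl (fun q g => if q < PySem.Set.len g then PySem.Set.len g else q) x) := by
  induction l with
  | nil => intro n x; rfl
  | cons g l ih => intro n x; simp only [List.foldl_cons]; exact ih _ _

theorem pv_foldl_max_le (l : List Int) :
    ∀ (a b : Int), a ≤ b → (∀ y ∈ l, y ≤ b) → l.foldl max a ≤ b := by
  induction l with
  | nil => intro a b hab _; exact hab
  | cons y l ih =>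
    intro a b hab h
    simp only [List.foldl_cons]
    exact ih _ _ (max_le hab (h y (List.mem_cons_self))) (fun z hz => h z (List.mem_cons_of_mem _ hz))

theorem pv_max_fold (l : List Int) (h : ∀ y ∈ l, 0 ≤ y) :
    l.foldl (fun q n => if q < n then n else q) 0 = PySem.List.maxD l (fun x => x) 0 := by
  have hfun : (fun (q n : Int) => if q < n then n else q) = max := by
    funext q n
    rcases lt_or_ge q n with hqn | hqn
    · rw [if_pos hqn, max_eq_right hqn.le]
    · rw [if_neg (not_lt.mpr hqn), max_eq_left hqn]
  rw [hfun]
  cases hl : PySem.List.max? l (fun x => x) with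
  | none =>
    rw [PySem.List.max?_eq_none_iff] at hl
    subst hl
    rfl
  | some mx =>
    have hmem := PySem.List.max?_mem hl
    have hisMax := PySem.List.max?_isMax hl
    have h1 : l.foldl max 0 ≤ mx := pv_foldl_max_le l 0 mx (h mx hmem) hisMax
    have h2 : mx ≤ l.foldl max 0 := (PySem.List.le_foldl_max l 0).2 mx hmem
    have : l.foldl max 0 = mx := le_antisymm h1 h2
    rw [this, PySem.List.maxD, hl]
    rfl

theorem pv_finish_eq (st : PvStateA) : pvFinishA st = pvStats st := by
  unfold pvFinishA pvStats
  rw [pv_pair_fold]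
  have hmax : (PySem.Dict.values st.2).foldl
      (fun q g => if q < PySem.Set.len g then PySem.Set.len g else q) 0
      = PySem.List.maxD ((PySem.Dict.values st.2).map (fun v => PySem.Set.len v)) (fun x => x) 0 := by
    rw [← pv_max_fold]
    · rw [List.foldl_map]
    · intro y hy
      obtain ⟨g, _, rfl⟩ := List.mem_map.mp hy
      unfold PySem.Set.len
      positivity
  rw [hmax]

-- ===== VERDICT (by name: the statement is the Claim_ definition above) =====
theorem transport_stats_subset_spec : Claim_equal_transport_stats_subset := by
  intro m subset _
  unfold Spec_transport_stats_subset transport_stats_subset transport_stats_subset_alt pvMainLoop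
  rw [PySem.List.foldl_if_eq_foldl_filter
        (p := fun y => PySem.Int.mod y.sum m == 4) (f := pvStepA m subset), pv_key]
  by_cases h4 : 4 < m
  · simp only [if_pos h4]
    rw [pv_finish_eq, pv_main_eq m subset]
  · simp only [if_neg h4, List.foldl_nil]
    rw [pv_finish_eq]
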